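-- pv_equiv track=rewrite | github.com/KyuSahm/problems-solving | DFS and BFS/python/paren_correct.py | process
-- ===== SOURCE A (Python) =====
-- def process(u, v):
--     if len(u) == 0:
--         return ''
--
--     if is_correct(u):
--         ans = u
--     else:
--         ans = correct(u)
--
--     index = find_sep_index(v)
--     nu = v[:index]
--     nv = v[index:]
--
--     ans += process(nu, nv)
--
--     return ans;
--
-- def correct(u):
--     u_center = u[1:-1]
--
--     rtn = '('
--     for c in u_center:
--         if c == '(':
--             rtn += ')'
--         else:
--             rtn += '('
--     rtn += ')'
--     return rtn
--
-- def is_correct(u):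
--     cnt = 0
--     for c in u:
--         if c == '(':
--             cnt += 1
--         else:
--             cnt -= 1
--
--         if cnt < 0:
--             return False
--     return True
--
-- def find_sep_index(str):
--     cnt = 0
--     for i in range(len(str)):
--         if str[i] == '(':
--             cnt += 1
--         else:
--             cnt -= 1
--
--         if cnt == 0:
--             return i + 1
--     return 0
-- ===== SOURCE B (Python) =====
-- def process(u, v):
--     if not u:
--         return ''
--     chunks = [u]
--     cur = ''
--     cnt = 0
--     for c in v:
--         cur += c
--         cnt += 1 if c == '(' else -1
--         if cnt == 0:
--             chunks.append(cur)
--             cur = ''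
--     return ''.join(fix(ch) for ch in chunks)
--
-- def fix(ch):
--     return ch if is_correct(ch) else correct(ch)
--
-- def correct(u):
--     return '(' + ''.join(')' if c == '(' else '(' for c in u[1:-1]) + ')'
--
-- def is_correct(u):
--     low = depth = 0
--     for c in u:
--         depth += 1 if c == '(' else -1
--         low = min(low, depth)
--     return low >= 0
-- ===== Notes on version B (the rewrite author's own statement) =====
-- stated objective: alternative
-- what changed: Instead of recursing and re-running find_sep_index on each remainder, B splits v into all balanced chunks in one forward scan (cutting whenever the running count returns to 0, dropping a dangling tail), then maps the repair (identity if is_correct else correct) over the chunk list and joins once; is_correct tracks the minimum prefix depth with no early return and correct inverts the middle with a comprehension.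
import Mathlib
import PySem

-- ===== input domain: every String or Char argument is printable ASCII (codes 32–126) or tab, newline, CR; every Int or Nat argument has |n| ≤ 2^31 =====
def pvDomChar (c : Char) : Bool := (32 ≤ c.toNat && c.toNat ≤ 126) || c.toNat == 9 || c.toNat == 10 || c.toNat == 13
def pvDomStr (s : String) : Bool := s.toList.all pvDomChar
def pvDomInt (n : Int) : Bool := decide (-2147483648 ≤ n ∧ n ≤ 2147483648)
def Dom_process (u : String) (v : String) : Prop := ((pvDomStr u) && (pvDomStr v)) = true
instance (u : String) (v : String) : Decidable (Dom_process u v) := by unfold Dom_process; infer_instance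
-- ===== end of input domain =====

-- B pre-splits v into all balanced chunks in one scan, then maps the fix over the chunk list and joins (objective: alternative); A re-finds a separator per recursive step and concatenates as it recurses.


-- ===== PORT A =====
-- is_correct: running counter, early False when it goes negative
def isCorrectGo (cs : List Char) (cnt : Int) : Bool :=
  match cs with
  | [] => true
  | c :: rest =>
    let cnt' := if c = '(' then cnt + 1 else cnt - 1
    if cnt' < 0 then false else isCorrectGo rest cnt'

def isCorrect (u : List Char) : Bool := isCorrectGo u 0

-- correct: '(' + inverted middle u[1:-1] + ')', built by a fold as A's loop does
def correctL (u : List Char) : List Char :=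
  '(' :: ((u.drop 1).dropLast.foldl (fun acc c => acc ++ [if c = '(' then ')' else '(']) []) ++ [')']

-- find_sep_index: first i with running count 0 gives i+1, else 0
def findSepGo (cs : List Char) (cnt : Int) (i : Nat) : Nat :=
  match cs with
  | [] => 0
  | c :: rest =>
    let cnt' := if c = '(' then cnt + 1 else cnt - 1
    if cnt' = 0 then i + 1 else findSepGo rest cnt' (i + 1)

def findSep (s : List Char) : Nat := findSepGo s 0 0

def processL (u : List Char) (v : List Char) : List Char :=
  if u = [] then []
  else
    (if isCorrect u then u else correctL u)
      ++ processL (v.take (findSep v)) (v.drop (findSep v))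
termination_by u.length + v.length
decreasing_by
  have h1 : 0 < u.length := List.length_pos_of_ne_nil (by assumption)
  simp only [List.length_take, List.length_drop]
  omega

def process (u : String) (v : String) : String := String.ofList (processL u.toList v.toList)

-- ===== PORT B =====
-- B's is_correct: track the minimum prefix depth, no early return; correct iff it never went below 0
def lowGo (cs : List Char) (depth low : Int) : Int :=
  match cs with
  | [] => low
  | c :: rest =>
    let d := if c = '(' then depth + 1 else depth - 1
    lowGo rest d (min low d)

def isCorrectB (u : List Char) : Bool := decide (0 ≤ lowGo u 0 0)

-- B's correct: map the inversion over the middle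
def correctB (u : List Char) : List Char :=
  '(' :: ((u.drop 1).dropLast.map (fun c => if c = '(' then ')' else '(')) ++ [')']

def fixChunk (ch : List Char) : List Char := if isCorrectB ch then ch else correctB ch

-- one scan of v: cut a chunk each time the running count returns to 0; a dangling tail is dropped
def splitChunks (cs : List Char) (cnt : Int) (cur : List Char) : List (List Char) :=
  match cs with
  | [] => []
  | c :: rest =>
    let cnt' := if c = '(' then cnt + 1 else cnt - 1
    if cnt' = 0 then (cur ++ [c]) :: splitChunks rest cnt' []
    else splitChunks rest cnt' (cur ++ [c])

def process_alt (u : String) (v : String) : String :=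
  if u.toList = [] then ""
  else String.ofList (((u.toList :: splitChunks v.toList 0 []).map fixChunk).flatten)

-- ===== PRECONDITION & SPEC =====
def Spec_process (u : String) (v : String) (out : String) : Prop := out = process_alt u v
instance (u : String) (v : String) (out : String) : Decidable (Spec_process u v out) := by unfold Spec_process; infer_instance

-- ===== CLAIM (what is proved, stated in full; the proofs are below) =====
def Claim_equal_process : Prop := ∀ (u : String) (v : String), Dom_process u v → Spec_process u v (process u v)

-- ===== LEMMAS AND PROOFS =====

theorem lowGo_le (cs : List Char) (d low : Int) : lowGo cs d low ≤ low := by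
  induction cs generalizing d low with
  | nil => simp [lowGo]
  | cons c rest ih =>
    simp only [lowGo]
    exact le_trans (ih _ _) (min_le_left _ _)

theorem isCorrectGo_eq_low (cs : List Char) (cnt low : Int) (hlow : 0 ≤ low) :
    isCorrectGo cs cnt = decide (0 ≤ lowGo cs cnt low) := by
  induction cs generalizing cnt low with
  | nil => simp [isCorrectGo, lowGo, hlow]
  | cons c rest ih =>
    simp only [isCorrectGo, lowGo]
    by_cases h : (if c = '(' then cnt + 1 else cnt - 1) < 0
    · rw [if_pos h]
      have h2 := lowGo_le rest (if c = '(' then cnt + 1 else cnt - 1)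
        (min low (if c = '(' then cnt + 1 else cnt - 1))
      have : lowGo rest (if c = '(' then cnt + 1 else cnt - 1)
          (min low (if c = '(' then cnt + 1 else cnt - 1)) < 0 := by
        have := min_le_right low (if c = '(' then cnt + 1 else cnt - 1)
        omega
      simp [this]
    · rw [if_neg h]
      exact ih _ _ (by have := le_min hlow (by omega : (0:Int) ≤ _); omega)

theorem isCorrect_eq (u : List Char) : isCorrect u = isCorrectB u := by
  unfold isCorrect isCorrectB
  exact isCorrectGo_eq_low u 0 0 le_rfl

theorem foldl_app_map (l : List Char) (acc : List Char) :
    l.foldl (fun acc c => acc ++ [if c = '(' then ')' else '(']) acc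
      = acc ++ l.map (fun c => if c = '(' then ')' else '(') := by
  induction l generalizing acc with
  | nil => simp
  | cons c rest ih => simp [ih]

theorem correct_eq (u : List Char) : correctL u = correctB u := by
  unfold correctL correctB
  rw [foldl_app_map]
  simp

theorem fix_eq (u : List Char) :
    (if isCorrect u then u else correctL u) = fixChunk u := by
  rw [isCorrect_eq, correct_eq]; rfl

-- find_sep's index accumulator merely shifts a nonzero result
theorem findSepGo_shift (cs : List Char) (cnt : Int) (i : Nat) :
    findSepGo cs cnt i =
      if findSepGo cs cnt 0 = 0 then 0 else findSepGo cs cnt 0 + i := by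
  induction cs generalizing cnt i with
  | nil => simp [findSepGo]
  | cons c rest ih =>
    simp only [findSepGo]
    by_cases h : (if c = '(' then cnt + 1 else cnt - 1) = 0
    · simp [h]; omega
    · rw [if_neg h, if_neg h, ih _ (i + 1), ih _ 1]
      by_cases h0 : findSepGo rest (if c = '(' then cnt + 1 else cnt - 1) 0 = 0
      · simp [h0]
      · simp [h0]; omega

-- B's one-scan splitter agrees with cutting at A's find_sep index chunk by chunk
theorem splitChunks_step (v : List Char) (cnt : Int) (cur : List Char) :
    splitChunks v cnt cur =
      if findSepGo v cnt 0 = 0 then []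
      else (cur ++ v.take (findSepGo v cnt 0))
            :: splitChunks (v.drop (findSepGo v cnt 0)) 0 [] := by
  induction v generalizing cnt cur with
  | nil => simp [splitChunks, findSepGo]
  | cons c rest ih =>
    simp only [splitChunks, findSepGo]
    by_cases h : (if c = '(' then cnt + 1 else cnt - 1) = 0
    · simp only [h]
      simp
    · rw [if_neg h, if_neg h, ih, findSepGo_shift rest _ 1]
      by_cases h0 : findSepGo rest (if c = '(' then cnt + 1 else cnt - 1) 0 = 0
      · simp [h0]
      · have h1 : findSepGo rest (if c = '(' then cnt + 1 else cnt - 1) 0 + 1 ≠ 0 := by omega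
        simp only [if_neg h0, if_neg h1]
        simp

theorem processL_eq (u v : List Char) :
    processL u v =
      if u = [] then [] else ((u :: splitChunks v 0 []).map fixChunk).flatten := by
  fun_induction processL u v with
  | case1 v => simp
  | case2 u v h ih =>
    rw [if_neg h, fix_eq]
    rw [splitChunks_step v 0 []]
    by_cases h0 : findSep v = 0
    · have h0' : findSepGo v 0 0 = 0 := h0
      rw [if_pos h0']
      have : processL (v.take (findSep v)) (v.drop (findSep v)) = [] := by
        rw [h0]; simp [processL]
      rw [this]; simp
    · have h0' : findSepGo v 0 0 ≠ 0 := h0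
      rw [if_neg h0']
      have htk : v.take (findSep v) ≠ [] := by
        have : findSepGo v 0 0 ≠ 0 := h0'
        cases v with
        | nil => simp [findSepGo] at this
        | cons c rest =>
          simp only [findSep]
          intro hc
          rcases Nat.eq_zero_or_pos (findSepGo (c :: rest) 0 0) with h1 | h1
          · exact h0' h1
          · rw [List.take_eq_nil_iff] at hc
            simp at hc
            omega
      rw [ih, if_neg htk]
      simp [findSep]

-- ===== VERDICT (by name: the statement is the Claim_ definition above) =====
theorem process_spec : Claim_equal_process := by
  intro u v _
  show process u v = process_alt u v
  unfold process process_alt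
  rw [processL_eq]
  by_cases h : u.toList = [] <;> simp [h]
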